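-- pv_equiv track=rewrite | github.com/red1239109-cmd/Resonetic-Core | resonetic/engine.py | _infer_layers
-- ===== SOURCE A (Python) =====
-- from typing import List, Dict, Any, Tuple
--
-- STRUCTURAL_KEYWORDS = {"structure", "pattern", "form", "connection", "combination", "reconstruction", "model", "framework", "align"}
--
-- TOPOLOGICAL_KEYWORDS = {"phase", "space", "vortex", "field", "density", "continuous", "discontinuous", "dimension", "topology"}
--
-- GENERATIVE_KEYWORDS = {"create", "generate", "code", "rearrange", "mimic", "expand", "experiment", "possible", "make"}
--
-- def _infer_layers(text: str) -> Tuple[str, str, str, str]: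
--     S = text.strip()
--
--     # Keyword matching for layers
--     words = text.lower().split()
--     structural_hits = [w for w in words if any(k in w for k in STRUCTURAL_KEYWORDS)]
--     topo_hits = [w for w in words if any(k in w for k in TOPOLOGICAL_KEYWORDS)]
--     gen_hits = [w for w in words if any(k in w for k in GENERATIVE_KEYWORDS)]
--
--     R = f"Structural Demand: {', '.join(structural_hits)}" if structural_hits else "No structural specificity detected."
--     T = f"Topological Constraint: {', '.join(topo_hits)}" if topo_hits else "No topological constraint detected."
--     G = f"Generative Goal: {', '.join(gen_hits)}" if gen_hits else "No generative command detected."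
--
--     return S, R, T, G
-- ===== SOURCE B (Python) =====
-- STRUCTURAL_KEYWORDS = {"structure", "pattern", "form", "connection", "combination", "reconstruction", "model", "framework", "align"}
--
-- TOPOLOGICAL_KEYWORDS = {"phase", "space", "vortex", "field", "density", "continuous", "discontinuous", "dimension", "topology"}
--
-- GENERATIVE_KEYWORDS = {"create", "generate", "code", "rearrange", "mimic", "expand", "experiment", "possible", "make"}
--
-- def _infer_layers(text):
--     # Inverted traversal: scan KEYWORDS in the outer loop, collecting the SET of
--     # indices of matching words; sorting the index set restores word order.
--     words = text.lower().split()
--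
--     def hits(keywords):
--         matched = set()
--         for k in keywords:
--             for i, w in enumerate(words):
--                 if k in w:
--                     matched.add(i)
--         return [words[i] for i in sorted(matched)]
--
--     structural_hits = hits(STRUCTURAL_KEYWORDS)
--     topo_hits = hits(TOPOLOGICAL_KEYWORDS)
--     gen_hits = hits(GENERATIVE_KEYWORDS)
--
--     R = f"Structural Demand: {', '.join(structural_hits)}" if structural_hits else "No structural specificity detected."
--     T = f"Topological Constraint: {', '.join(topo_hits)}" if topo_hits else "No topological constraint detected."
--     G = f"Generative Goal: {', '.join(gen_hits)}" if gen_hits else "No generative command detected."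
--
--     return text.strip(), R, T, G
-- ===== Notes on version B (the rewrite author's own statement) =====
-- stated objective: alternative
-- what changed: B inverts the traversal: instead of A's three word-wise filter passes each testing any(k in w), B scans the keywords in the outer loop and the words in the inner loop, accumulating a set of matching word indices per layer, then sorts each index set and reads the words back off in order.
import Mathlib
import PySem

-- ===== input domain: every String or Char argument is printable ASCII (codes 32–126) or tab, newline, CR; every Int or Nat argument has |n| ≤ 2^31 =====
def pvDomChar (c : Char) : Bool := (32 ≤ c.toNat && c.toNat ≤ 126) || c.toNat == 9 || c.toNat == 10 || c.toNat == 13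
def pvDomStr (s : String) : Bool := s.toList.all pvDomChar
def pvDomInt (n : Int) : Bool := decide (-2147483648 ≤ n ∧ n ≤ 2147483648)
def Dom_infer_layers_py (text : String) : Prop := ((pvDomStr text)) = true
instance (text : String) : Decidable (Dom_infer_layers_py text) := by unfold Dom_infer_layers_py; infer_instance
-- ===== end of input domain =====

-- B inverts A's traversal: keywords outer / words inner, collecting a set of matching word
-- indices per layer and sorting it, instead of A's three per-word any-filter passes (objective: alternative).


-- ===== PORT A =====
-- module constants (Python sets of distinct string literals)
def pvSK : List String := ["structure", "pattern", "form", "connection", "combination", "reconstruction", "model", "framework", "align"]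
def pvTK : List String := ["phase", "space", "vortex", "field", "density", "continuous", "discontinuous", "dimension", "topology"]
def pvGK : List String := ["create", "generate", "code", "rearrange", "mimic", "expand", "experiment", "possible", "make"]

-- any(k in w for k in keywords)
def pvHit (ks : List String) (w : String) : Bool := ks.any (fun k => PySem.Str.isIn k w)

def infer_layers_py (text : String) : String × String × String × String :=
  let S := PySem.Str.strip text
  let words := PySem.Str.split₀ (PySem.Str.lower text)
  let structural_hits := words.filter (fun w => pvHit pvSK w)
  let topo_hits := words.filter (fun w => pvHit pvTK w)
  let gen_hits := words.filter (fun w => pvHit pvGK w)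
  let R := if structural_hits ≠ [] then "Structural Demand: " ++ PySem.Str.join ", " structural_hits else "No structural specificity detected."
  let T := if topo_hits ≠ [] then "Topological Constraint: " ++ PySem.Str.join ", " topo_hits else "No topological constraint detected."
  let G := if gen_hits ≠ [] then "Generative Goal: " ++ PySem.Str.join ", " gen_hits else "No generative command detected."
  (S, R, T, G)

-- ===== PORT B =====
-- the nested loop 'for k in keywords: for i, w in enumerate(words): if k in w: matched.add(i)'
def pvCollect (ks : List String) (ws : List String) : PySem.Set Int :=
  ks.foldl
    (fun matched k =>
      (PySem.List.enumerate ws).foldl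
        (fun matched p => if PySem.Str.isIn k p.2 then PySem.Set.add matched p.1 else matched)
        matched)
    PySem.Set.empty

-- '[words[i] for i in sorted(matched)]' — words[i] is always in range here, so pyGetD is exact
def pvHits (ks : List String) (ws : List String) : List String :=
  (PySem.List.sorted (pvCollect ks ws) (fun i => i) false).map (fun i => PySem.List.pyGetD ws i "")

def infer_layers_py_alt (text : String) : String × String × String × String :=
  let words := PySem.Str.split₀ (PySem.Str.lower text)
  let structural_hits := pvHits pvSK words
  let topo_hits := pvHits pvTK words
  let gen_hits := pvHits pvGK words
  let R := if structural_hits ≠ [] then "Structural Demand: " ++ PySem.Str.join ", " structural_hits else "No structural specificity detected."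
  let T := if topo_hits ≠ [] then "Topological Constraint: " ++ PySem.Str.join ", " topo_hits else "No topological constraint detected."
  let G := if gen_hits ≠ [] then "Generative Goal: " ++ PySem.Str.join ", " gen_hits else "No generative command detected."
  (PySem.Str.strip text, R, T, G)

-- ===== PRECONDITION & SPEC =====
def Spec_infer_layers_py (text : String) (out : String × String × String × String) : Prop := out = infer_layers_py_alt text
instance (text : String) (out : String × String × String × String) : Decidable (Spec_infer_layers_py text out) := by unfold Spec_infer_layers_py; infer_instance

-- ===== CLAIM (what is proved, stated in full; the proofs are below) =====
def Claim_equal_infer_layers_py : Prop := ∀ (text : String), Dom_infer_layers_py text → Spec_infer_layers_py text (infer_layers_py text)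

-- ===== LEMMAS AND PROOFS =====

-- the target index list: word indices whose word matches, in increasing order
def pvIdx (ks : List String) (ws : List String) : List Int :=
  ((PySem.List.enumerate ws).filter (fun p => pvHit ks p.2)).map (fun p => p.1)

theorem mem_inner (k : String) (ws : List String) (s : PySem.Set Int) (i : Int) :
    (i ∈ (PySem.List.enumerate ws).foldl
        (fun matched p => if PySem.Str.isIn k p.2 then PySem.Set.add matched p.1 else matched) s) ↔
      i ∈ s ∨ ∃ p ∈ PySem.List.enumerate ws, PySem.Str.isIn k p.2 ∧ p.1 = i := by
  induction PySem.List.enumerate ws generalizing s with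
  | nil => simp
  | cons q t ih =>
      rw [List.foldl_cons]
      by_cases h : PySem.Str.isIn k q.2
      · rw [if_pos h, ih]
        constructor
        · rintro (him | ⟨p, hp, hk, hi⟩)
          · rcases (PySem.Set.mem_add s q.1 i).mp him with hs | rfl
            · exact Or.inl hs
            · exact Or.inr ⟨q, List.mem_cons_self .., h, rfl⟩
          · exact Or.inr ⟨p, List.mem_cons_of_mem _ hp, hk, hi⟩
        · rintro (hs | ⟨p, hp, hk, hi⟩)
          · exact Or.inl ((PySem.Set.mem_add s q.1 i).mpr (Or.inl hs))
          · rcases List.mem_cons.mp hp with rfl | hp'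
            · exact Or.inl ((PySem.Set.mem_add s p.1 i).mpr (Or.inr hi.symm))
            · exact Or.inr ⟨p, hp', hk, hi⟩
      · rw [if_neg h, ih]
        constructor
        · rintro (hs | ⟨p, hp, hk, hi⟩)
          · exact Or.inl hs
          · exact Or.inr ⟨p, List.mem_cons_of_mem _ hp, hk, hi⟩
        · rintro (hs | ⟨p, hp, hk, hi⟩)
          · exact Or.inl hs
          · rcases List.mem_cons.mp hp with rfl | hp'
            · exact absurd hk h
            · exact Or.inr ⟨p, hp', hk, hi⟩

theorem nodup_inner (k : String) (l : List (Int × String)) (s : PySem.Set Int) (hs : s.Nodup) :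
    (l.foldl (fun matched p => if PySem.Str.isIn k p.2 then PySem.Set.add matched p.1 else matched) s).Nodup := by
  induction l generalizing s with
  | nil => exact hs
  | cons q t ih =>
      simp only [List.foldl_cons]
      by_cases h : PySem.Str.isIn k q.2
      · rw [if_pos h]; exact ih _ (PySem.Set.nodup_add _ _ hs)
      · rw [if_neg h]; exact ih _ hs

theorem mem_collect (ks ws : List String) (i : Int) :
    i ∈ pvCollect ks ws ↔ ∃ p ∈ PySem.List.enumerate ws, pvHit ks p.2 ∧ p.1 = i := by
  unfold pvCollect
  have main : ∀ (ks' : List String) (s : PySem.Set Int),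
      (i ∈ ks'.foldl (fun matched k =>
          (PySem.List.enumerate ws).foldl
            (fun matched p => if PySem.Str.isIn k p.2 then PySem.Set.add matched p.1 else matched) matched) s) ↔
        i ∈ s ∨ ∃ p ∈ PySem.List.enumerate ws, (∃ k ∈ ks', PySem.Str.isIn k p.2) ∧ p.1 = i := by
    intro ks' ; induction ks' with
    | nil => simp
    | cons k t ih =>
        intro s
        simp only [List.foldl_cons, ih, mem_inner]
        constructor
        · rintro ((hs | ⟨p, hp, hk, hi⟩) | ⟨p, hp, ⟨k', hk', hkk⟩, hi⟩)
          · exact Or.inl hs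
          · exact Or.inr ⟨p, hp, ⟨k, by simp, hk⟩, hi⟩
          · exact Or.inr ⟨p, hp, ⟨k', by simp [hk'], hkk⟩, hi⟩
        · rintro (hs | ⟨p, hp, ⟨k', hk', hkk⟩, hi⟩)
          · exact Or.inl (Or.inl hs)
          · rcases List.mem_cons.mp hk' with h | h
            · exact Or.inl (Or.inr ⟨p, hp, h ▸ hkk, hi⟩)
            · exact Or.inr ⟨p, hp, ⟨k', h, hkk⟩, hi⟩
  rw [main]
  simp only [PySem.Set.empty, List.not_mem_nil, false_or]
  constructor
  · rintro ⟨p, hp, hk, hi⟩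
    exact ⟨p, hp, by simpa [pvHit, List.any_eq_true] using hk, hi⟩
  · rintro ⟨p, hp, hk, hi⟩
    exact ⟨p, hp, by simpa [pvHit, List.any_eq_true] using hk, hi⟩

theorem nodup_collect (ks ws : List String) : (pvCollect ks ws).Nodup := by
  unfold pvCollect
  have : ∀ (ks' : List String) (s : PySem.Set Int), s.Nodup →
      (ks'.foldl (fun matched k =>
          (PySem.List.enumerate ws).foldl
            (fun matched p => if PySem.Str.isIn k p.2 then PySem.Set.add matched p.1 else matched) matched) s).Nodup := by
    intro ks'; induction ks' with
    | nil => intro s hs; exact hs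
    | cons k t ih => intro s hs; exact ih _ (nodup_inner k _ s hs)
  exact this ks PySem.Set.empty (by simp [PySem.Set.empty])

theorem pairwise_pvIdx (ks ws : List String) : (pvIdx ks ws).Pairwise (· < ·) := by
  unfold pvIdx
  exact List.Pairwise.map _ (fun a b h => h)
    ((PySem.List.pairwise_lt_enumerate ws 0).filter _)

theorem mem_pvIdx (ks ws : List String) (i : Int) :
    i ∈ pvIdx ks ws ↔ ∃ p ∈ PySem.List.enumerate ws, pvHit ks p.2 ∧ p.1 = i := by
  unfold pvIdx
  simp only [List.mem_map, List.mem_filter]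
  constructor
  · rintro ⟨p, ⟨hp, hk⟩, hi⟩; exact ⟨p, hp, hk, hi⟩
  · rintro ⟨p, hp, hk, hi⟩; exact ⟨p, ⟨hp, hk⟩, hi⟩

theorem sorted_collect (ks ws : List String) :
    PySem.List.sorted (pvCollect ks ws) (fun i => i) false = pvIdx ks ws := by
  apply PySem.List.sorted_eq_of_perm_of_pairwise_lt
  · apply (List.perm_ext_iff_of_nodup ?_ ?_).mpr
    · intro i; rw [mem_pvIdx, mem_collect]
    · exact (pairwise_pvIdx ks ws).imp (fun h => ne_of_lt h)
    · exact nodup_collect ks ws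
  · exact pairwise_pvIdx ks ws

theorem enumerate_filter_map_snd (q : String → Bool) (ws : List String) :
    ∀ s : Int, ((PySem.List.enumerate ws s).filter (fun p => q p.2)).map (fun p => p.2) = ws.filter q := by
  induction ws with
  | nil => intro s; simp [PySem.List.enumerate_nil]
  | cons w t ih =>
      intro s
      rw [PySem.List.enumerate_cons]
      by_cases h : q w <;> simp [h, ih]

theorem pvHits_eq_filter (ks ws : List String) :
    pvHits ks ws = ws.filter (fun w => pvHit ks w) := by
  unfold pvHits
  rw [sorted_collect]
  unfold pvIdx
  rw [List.map_map]
  have hmap : ∀ p ∈ (PySem.List.enumerate ws).filter (fun p => pvHit ks p.2),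
      ((fun i => PySem.List.pyGetD ws i "") ∘ (fun p : Int × String => p.1)) p = p.2 := by
    intro p hp
    have hp' := List.mem_filter.mp hp |>.1
    rcases (PySem.List.mem_enumerate_iff ws 0 p).mp hp' with ⟨k, hk, rfl⟩
    simp [PySem.List.pyGetD_natCast, hk]
  rw [List.map_congr_left hmap]
  exact enumerate_filter_map_snd _ ws 0

-- ===== VERDICT (by name: the statement is the Claim_ definition above) =====
theorem infer_layers_py_spec : Claim_equal_infer_layers_py := by
  intro text _
  unfold Spec_infer_layers_py
  simp only [infer_layers_py, infer_layers_py_alt, pvHits_eq_filter]
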